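-- pv_equiv track=rewrite | github.com/AdamZhouSE/pythonHomework | Code/CodeRecords/2410/58822/278765.py | dp
-- ===== SOURCE A (Python) =====
-- def dp(a, num):
--     max_len = 1
--     for i in range(len(a)):
--         tmp_len = 1
--         for j in range(i + 1, len(a)):
--             if a[j] - a[i] == tmp_len * num:
--                 tmp_len += 1
--         max_len = max(max_len, tmp_len)
--     return max_len
-- ===== SOURCE B (Python) =====
-- def dp(a, num):
--     # Right-to-left DP: d[v] = length of the greedy chain starting at the
--     # nearest occurrence of v to the right (i.e. the leftmost seen so far).
--     best = 1
--     d = {}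
--     for x in reversed(a):
--         l = 1 + d.get(x + num, 0)
--         d[x] = l
--         if l > best:
--             best = l
--     return best
-- ===== Notes on version B (the rewrite author's own statement) =====
-- stated objective: faster
-- what changed: Replaces the quadratic per-start rescan with a single right-to-left pass keeping a dict from value to the chain length starting at its nearest occurrence (L[i] = 1 + d.get(a[i]+num, 0)).
import Mathlib
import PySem

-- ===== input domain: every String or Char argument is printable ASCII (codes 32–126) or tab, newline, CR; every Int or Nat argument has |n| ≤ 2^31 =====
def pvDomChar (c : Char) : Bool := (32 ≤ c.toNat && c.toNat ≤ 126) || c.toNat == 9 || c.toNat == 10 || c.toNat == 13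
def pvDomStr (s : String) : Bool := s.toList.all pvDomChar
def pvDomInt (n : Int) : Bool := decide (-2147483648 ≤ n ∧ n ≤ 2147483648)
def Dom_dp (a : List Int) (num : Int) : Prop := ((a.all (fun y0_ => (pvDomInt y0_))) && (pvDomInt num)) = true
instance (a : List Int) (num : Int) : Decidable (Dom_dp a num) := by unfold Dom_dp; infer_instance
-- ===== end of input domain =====

-- B replaces A's quadratic per-start rescan with one right-to-left pass over a
-- value→chain-length dict (objective: faster; same return value everywhere).

-- ===== PORT A =====
-- a[i]/a[j] are always in range here (i, j drawn from range(len(a))), so pyGetD is exact.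
def dp (a : List Int) (num : Int) : Int :=
  (PySem.List.pyRange 0 (a.length : Int) 1).foldl (fun max_len i =>
    let tmp_len := (PySem.List.pyRange (i + 1) (a.length : Int) 1).foldl (fun tmp_len j =>
      if PySem.List.pyGetD a j 0 - PySem.List.pyGetD a i 0 = tmp_len * num then tmp_len + 1
      else tmp_len) 1
    max max_len tmp_len) 1

-- ===== PORT B =====
-- loop body of Source B: l = 1 + d.get(x+num, 0); d[x] = l; if l > best: best = l
def dpStep (num : Int) (st : Int × PySem.Dict Int Int) (x : Int) : Int × PySem.Dict Int Int :=
  let l := 1 + st.2.getD (x + num) 0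
  let d := st.2.insert x l
  let best := if st.1 < l then l else st.1
  (best, d)

def dp_alt (a : List Int) (num : Int) : Int :=
  (a.reverse.foldl (dpStep num) (1, PySem.Dict.empty)).1

-- ===== PRECONDITION & SPEC =====
def Spec_dp (a : List Int) (num : Int) (out : Int) : Prop := out = dp_alt a num
instance (a : List Int) (num : Int) (out : Int) : Decidable (Spec_dp a num out) := by unfold Spec_dp; infer_instance

-- ===== CLAIM (what is proved, stated in full; the proofs are below) =====
def Claim_equal_dp : Prop := ∀ (a : List Int) (num : Int), Dom_dp a num → Spec_dp a num (dp a num)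

-- ===== LEMMAS AND PROOFS =====

-- greedy chain pvSearch: number of hits scanning l left-to-right for t, t+num, t+2*num, …
def pvSearch (num : Int) : List Int → Int → Int
  | [], _ => 0
  | y :: ys, t => if y = t then 1 + pvSearch num ys (t + num) else pvSearch num ys t

-- the value both programs compute: max over suffixes x::ys of 1 + pvSearch ys (x+num), at least 1
def pvMaxChain (num : Int) : List Int → Int
  | [] => 1
  | x :: ys => max (1 + pvSearch num ys (x + num)) (pvMaxChain num ys)

theorem one_le_pvMaxChain (num : Int) (l : List Int) : 1 ≤ pvMaxChain num l := by
  induction l with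
  | nil => simp [pvMaxChain]
  | cons x ys ih => exact le_trans ih (le_max_right _ _)

theorem if_lt_eq_max (a b : Int) : (if a < b then b else a) = max b a := by
  by_cases h : a < b
  · simp [h, max_eq_left (le_of_lt h)]
  · simp [h, max_eq_right (not_lt.mp h)]

-- A's inner loop over a suffix equals tmp + pvSearch with target base + tmp*num
theorem inner_eq_search (num base : Int) (l : List Int) : ∀ tmp : Int,
    l.foldl (fun tmp y => if y - base = tmp * num then tmp + 1 else tmp) tmp
      = tmp + pvSearch num l (base + tmp * num) := by
  induction l with
  | nil => intro tmp; simp [pvSearch]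
  | cons y ys ih =>
    intro tmp
    simp only [List.foldl_cons, pvSearch]
    by_cases h : y - base = tmp * num
    · have hy : y = base + tmp * num := by omega
      rw [if_pos h, if_pos hy, ih (tmp + 1)]
      ring_nf
    · have hy : ¬ y = base + tmp * num := by omega
      rw [if_neg h, if_neg hy, ih tmp]

-- A's outer loop from index k with accumulator m ≥ 1
theorem outer_eq_pvMaxChain (num : Int) (a : List Int) : ∀ (c : ℕ) (k : Int), 0 ≤ k →
    k + c = (a.length : Int) → ∀ m : Int, 1 ≤ m →
    (PySem.List.pyRange k (a.length : Int) 1).foldl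
      (fun m i => max m (1 + pvSearch num (a.drop (i + 1).toNat) (PySem.List.pyGetD a i 0 + num))) m
      = max m (pvMaxChain num (a.drop k.toNat)) := by
  intro c
  induction c with
  | zero =>
    intro k hk0 hkc m hm
    have hk : k = (a.length : Int) := by omega
    have hd : a.length ≤ k.toNat := by omega
    rw [PySem.List.pyRange_one_eq_nil (by omega), List.drop_eq_nil_of_le hd]
    simp [pvMaxChain, max_eq_left hm]
  | succ c ih =>
    intro k hk0 hkc m hm
    have hklt : k < (a.length : Int) := by omega
    have hkn : k.toNat < a.length := by omega
    rw [PySem.List.pyRange_one_cons hklt, List.foldl_cons]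
    have h1 : (0:Int) ≤ k + 1 := by omega
    have h2 : (k + 1) + (c:Int) = (a.length : Int) := by push_cast at hkc ⊢; omega
    have hih := ih (k + 1) h1 h2
    rw [hih _ (le_trans hm (le_max_left _ _))]
    have hget : PySem.List.pyGetD a k 0 = a[k.toNat] :=
      PySem.List.pyGetD_eq_getElem a (i := k) 0 hk0 hklt
    have ht1 : (k + 1).toNat = k.toNat + 1 := by omega
    rw [List.drop_eq_getElem_cons hkn]
    simp only [pvMaxChain, hget, ht1, max_assoc]

-- B's foldr invariant: first component is pvMaxChain, dict maps v to pvSearch a v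
theorem bfold_invariant (num : Int) (a : List Int) :
    (a.foldr (fun x st => dpStep num st x) ((1 : Int), (PySem.Dict.empty : PySem.Dict Int Int))).1
        = pvMaxChain num a ∧
    ∀ v : Int, (a.foldr (fun x st => dpStep num st x)
        ((1 : Int), (PySem.Dict.empty : PySem.Dict Int Int))).2.getD v 0 = pvSearch num a v := by
  induction a with
  | nil => exact ⟨rfl, fun v => by simp [pvSearch, PySem.Dict.getD_empty]⟩
  | cons x ys ih =>
    obtain ⟨h1, h2⟩ := ih
    rw [List.foldr_cons]
    set r := ys.foldr (fun x st => dpStep num st x) ((1 : Int), (PySem.Dict.empty : PySem.Dict Int Int)) with hr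
    constructor
    · simp only [dpStep, h1, h2, if_lt_eq_max, pvMaxChain]
    · intro v
      simp only [dpStep, PySem.Dict.getD_insert, pvSearch]
      by_cases hv : v = x
      · subst hv
        simp [h2]
      · have hx : ¬ x = v := fun h => hv h.symm
        simp [hv, hx, h2 v]

theorem dp_alt_eq_pvMaxChain (a : List Int) (num : Int) : dp_alt a num = pvMaxChain num a := by
  unfold dp_alt
  rw [List.foldl_reverse]
  exact (bfold_invariant num a).1

theorem dp_eq_pvMaxChain (a : List Int) (num : Int) : dp a num = pvMaxChain num a := by
  unfold dp
  rw [PySem.List.foldl_congr_mem _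
      (fun max_len i =>
        let tmp_len := (PySem.List.pyRange (i + 1) (a.length : Int) 1).foldl (fun tmp_len j =>
          if PySem.List.pyGetD a j 0 - PySem.List.pyGetD a i 0 = tmp_len * num then tmp_len + 1
          else tmp_len) 1
        max max_len tmp_len)
      (fun acc i => max acc (1 + pvSearch num (a.drop (i + 1).toNat) (PySem.List.pyGetD a i 0 + num)))
      1 ?_]
  · rw [outer_eq_pvMaxChain num a a.length 0 (by omega) (by omega) 1 (by omega)]
    simp [max_eq_right (one_le_pvMaxChain num a)]
  · intro acc i hi
    have hmem := (PySem.List.mem_pyRange_one).mp hi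
    simp only
    rw [show (PySem.List.pyRange (i + 1) (a.length : Int) 1).foldl (fun tmp_len j =>
          if PySem.List.pyGetD a j 0 - PySem.List.pyGetD a i 0 = tmp_len * num then tmp_len + 1
          else tmp_len) 1
        = (a.drop (i + 1).toNat).foldl (fun tmp y =>
            if y - PySem.List.pyGetD a i 0 = tmp * num then tmp + 1 else tmp) 1 from
      PySem.List.foldl_pyRange_pyGetD' a 0
        (fun tmp y => if y - PySem.List.pyGetD a i 0 = tmp * num then tmp + 1 else tmp) 1
        (by omega),
      inner_eq_search num (PySem.List.pyGetD a i 0) _ 1, one_mul]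

-- ===== VERDICT (by name: the statement is the Claim_ definition above) =====
theorem dp_spec : Claim_equal_dp := by
  intro a num _
  unfold Spec_dp
  rw [dp_eq_pvMaxChain, dp_alt_eq_pvMaxChain]
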